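-- pv_equiv track=rewrite | github.com/Kinnar05/Sanjay_sir | accuracy_table.py | find_matching_channel
-- ===== SOURCE A (Python) =====
-- def find_matching_channel(target_channel, available_channels):
--     """Find matching channel name in available channels"""
--     target_upper = target_channel.upper()
--
--     # Try exact match first
--     for ch in available_channels:
--         if ch.upper() == target_upper:
--             return ch
--
--     # Try contains match
--     for ch in available_channels:
--         ch_upper = ch.upper()
--         # Check if target is contained in channel name
--         if target_upper in ch_upper:
--             return ch
--         # Check if channel name is contained in target
--         if ch_upper in target_upper:
--             return ch
--
--     # Try partial match (e.g., "FP1" in "EEG FP1-REF")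
--     for ch in available_channels:
--         ch_cleaned = ch.upper().replace('EEG', '').replace('-', '').replace('REF', '').strip()
--         if target_upper == ch_cleaned:
--             return ch
--
--     return None
-- ===== SOURCE B (Python) =====
-- def find_matching_channel(target_channel, available_channels):
--     """Find matching channel name in available channels (single classifying pass)."""
--     target_upper = target_channel.upper()
--     best = None  # (tier, channel); tier 2 = contains-match, tier 3 = cleaned-match
--     for ch in available_channels:
--         ch_upper = ch.upper()
--         if ch_upper == target_upper:
--             return ch  # exact match wins immediately
--         if target_upper in ch_upper or ch_upper in target_upper:
--             tier = 2
--         elif target_upper == ch_upper.replace('EEG', '').replace('-', '').replace('REF', '').strip():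
--             tier = 3
--         else:
--             continue
--         if best is None or tier < best[0]:
--             best = (tier, ch)
--     return best[1] if best is not None else None
-- ===== Notes on version B (the rewrite author's own statement) =====
-- stated objective: alternative
-- what changed: Replaces A's three sequential scans (exact, contains, cleaned) by one pass that classifies each channel into a priority tier and keeps the best-tier earliest candidate, returning immediately on an exact match.
import Mathlib
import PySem

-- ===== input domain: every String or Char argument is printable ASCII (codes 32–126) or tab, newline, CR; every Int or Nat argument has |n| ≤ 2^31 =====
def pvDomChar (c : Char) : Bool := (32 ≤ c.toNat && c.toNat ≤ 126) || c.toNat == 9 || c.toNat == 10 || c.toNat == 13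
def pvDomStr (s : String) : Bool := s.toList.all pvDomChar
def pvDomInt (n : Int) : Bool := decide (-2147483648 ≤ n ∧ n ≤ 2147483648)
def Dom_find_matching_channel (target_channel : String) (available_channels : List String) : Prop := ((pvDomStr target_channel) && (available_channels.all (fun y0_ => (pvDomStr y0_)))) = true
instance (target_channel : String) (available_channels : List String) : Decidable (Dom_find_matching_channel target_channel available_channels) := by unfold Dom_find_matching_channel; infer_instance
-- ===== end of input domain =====

-- B replaces A's three sequential scans by one classifying pass keeping the best-tier earliest candidate (alternative decomposition, same result).


-- ===== PORT A =====
-- first loop: exact match on uppercased names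
def fmc_pass1 (tu : String) : List String → Option String
  | [] => none
  | ch :: rest => if PySem.Str.upper ch == tu then some ch else fmc_pass1 tu rest

-- second loop: containment either way (two ifs, as in the source)
def fmc_pass2 (tu : String) : List String → Option String
  | [] => none
  | ch :: rest =>
    let ch_upper := PySem.Str.upper ch
    if PySem.Str.isIn tu ch_upper then some ch
    else if PySem.Str.isIn ch_upper tu then some ch
    else fmc_pass2 tu rest

-- the cleaned form: ch.upper().replace('EEG','').replace('-','').replace('REF','').strip()
def fmc_clean (ch : String) : String :=
  PySem.Str.strip (PySem.Str.replace (PySem.Str.replace (PySem.Str.replace (PySem.Str.upper ch) "EEG" "") "-" "") "REF" "")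

-- third loop: cleaned-form match
def fmc_pass3 (tu : String) : List String → Option String
  | [] => none
  | ch :: rest => if tu == fmc_clean ch then some ch else fmc_pass3 tu rest

def find_matching_channel (target_channel : String) (available_channels : List String) : Option String :=
  let target_upper := PySem.Str.upper target_channel
  match fmc_pass1 target_upper available_channels with
  | some ch => some ch
  | none =>
    match fmc_pass2 target_upper available_channels with
    | some ch => some ch
    | none => fmc_pass3 target_upper available_channels

-- ===== PORT B =====
-- single pass keeping the best (tier, channel); exact match returns immediately
def fmcAlt_go (tu : String) (best : Option (Nat × String)) : List String → Option String
  | [] => best.map Prod.snd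
  | ch :: rest =>
    let ch_upper := PySem.Str.upper ch
    if ch_upper == tu then some ch
    else
      let t? : Option Nat :=
        if PySem.Str.isIn tu ch_upper || PySem.Str.isIn ch_upper tu then some 2
        else if tu == PySem.Str.strip (PySem.Str.replace (PySem.Str.replace (PySem.Str.replace ch_upper "EEG" "") "-" "") "REF" "") then some 3
        else none
      match t? with
      | none => fmcAlt_go tu best rest
      | some t =>
        match best with
        | none => fmcAlt_go tu (some (t, ch)) rest
        | some b => fmcAlt_go tu (if t < b.1 then some (t, ch) else some b) rest

def find_matching_channel_alt (target_channel : String) (available_channels : List String) : Option String :=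
  fmcAlt_go (PySem.Str.upper target_channel) none available_channels

-- ===== PRECONDITION & SPEC =====
def Spec_find_matching_channel (target_channel : String) (available_channels : List String) (out : Option String) : Prop := out = find_matching_channel_alt target_channel available_channels
instance (target_channel : String) (available_channels : List String) (out : Option String) : Decidable (Spec_find_matching_channel target_channel available_channels out) := by unfold Spec_find_matching_channel; infer_instance

-- ===== CLAIM (what is proved, stated in full; the proofs are below) =====
def Claim_equal_find_matching_channel : Prop := ∀ (target_channel : String) (available_channels : List String), Dom_find_matching_channel target_channel available_channels → Spec_find_matching_channel target_channel available_channels (find_matching_channel target_channel available_channels)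

-- ===== LEMMAS AND PROOFS =====

theorem fmc_clean_eq (ch : String) :
    PySem.Str.strip (PySem.Str.replace (PySem.Str.replace (PySem.Str.replace (PySem.Str.upper ch) "EEG" "") "-" "") "REF" "") = fmc_clean ch := rfl

-- with a tier-2 best, nothing but an exact match can displace it
theorem fmcAlt_go_two (tu b : String) (l : List String) :
    fmcAlt_go tu (some (2, b)) l = (fmc_pass1 tu l).or (some b) := by
  induction l with
  | nil => rfl
  | cons ch rest ih =>
    by_cases h1 : PySem.Str.upper ch = tu
    · simp [fmcAlt_go, fmc_pass1, h1, Option.or]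
    · by_cases hP : PySem.Chars.isIn tu.toList (PySem.Chars.upper ch.toList) = true
      · simp [fmcAlt_go, fmc_pass1, h1, hP, ih]
      · by_cases hQ : PySem.Chars.isIn (PySem.Chars.upper ch.toList) tu.toList = true
        · simp [fmcAlt_go, fmc_pass1, h1, hP, hQ, ih]
        · by_cases h3 : tu = PySem.Str.strip (PySem.Str.replace (PySem.Str.replace (PySem.Str.replace (PySem.Str.upper ch) "EEG" "") "-" "") "REF" "")
          · have h3a : PySem.Str.strip (PySem.Str.replace (PySem.Str.replace (PySem.Str.replace (PySem.Str.upper ch) "EEG" "") "-" "") "REF" "") = tu := h3.symm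
            simp [fmcAlt_go, fmc_pass1, h1, hP, hQ, h3a, ih]
          · simp [fmcAlt_go, fmc_pass1, h1, hP, hQ, h3, ih]

-- with a tier-3 best, an exact or contains match displaces it
theorem fmcAlt_go_three (tu b : String) (l : List String) :
    fmcAlt_go tu (some (3, b)) l = ((fmc_pass1 tu l).or (fmc_pass2 tu l)).or (some b) := by
  induction l with
  | nil => rfl
  | cons ch rest ih =>
    by_cases h1 : PySem.Str.upper ch = tu
    · simp [fmcAlt_go, fmc_pass1, h1, Option.or]
    · by_cases hP : PySem.Chars.isIn tu.toList (PySem.Chars.upper ch.toList) = true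
      · simp [fmcAlt_go, fmc_pass1, fmc_pass2, h1, hP, fmcAlt_go_two]
      · by_cases hQ : PySem.Chars.isIn (PySem.Chars.upper ch.toList) tu.toList = true
        · simp [fmcAlt_go, fmc_pass1, fmc_pass2, h1, hP, hQ, fmcAlt_go_two]
        · by_cases h3 : tu = PySem.Str.strip (PySem.Str.replace (PySem.Str.replace (PySem.Str.replace (PySem.Str.upper ch) "EEG" "") "-" "") "REF" "")
          · have h3a : PySem.Str.strip (PySem.Str.replace (PySem.Str.replace (PySem.Str.replace (PySem.Str.upper ch) "EEG" "") "-" "") "REF" "") = tu := h3.symm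
            simp [fmcAlt_go, fmc_pass1, fmc_pass2, h1, hP, hQ, h3a, ih]
          · simp [fmcAlt_go, fmc_pass1, fmc_pass2, h1, hP, hQ, h3, ih]

-- the single pass computes A's three-pass chain
theorem fmcAlt_go_none (tu : String) (l : List String) :
    fmcAlt_go tu none l = ((fmc_pass1 tu l).or (fmc_pass2 tu l)).or (fmc_pass3 tu l) := by
  induction l with
  | nil => rfl
  | cons ch rest ih =>
    by_cases h1 : PySem.Str.upper ch = tu
    · simp [fmcAlt_go, fmc_pass1, h1, Option.or]
    · by_cases hP : PySem.Chars.isIn tu.toList (PySem.Chars.upper ch.toList) = true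
      · simp [fmcAlt_go, fmc_pass1, fmc_pass2, h1, hP, fmcAlt_go_two]
      · by_cases hQ : PySem.Chars.isIn (PySem.Chars.upper ch.toList) tu.toList = true
        · simp [fmcAlt_go, fmc_pass1, fmc_pass2, h1, hP, hQ, fmcAlt_go_two]
        · by_cases h3 : tu = PySem.Str.strip (PySem.Str.replace (PySem.Str.replace (PySem.Str.replace (PySem.Str.upper ch) "EEG" "") "-" "") "REF" "")
          · have h3a : PySem.Str.strip (PySem.Str.replace (PySem.Str.replace (PySem.Str.replace (PySem.Str.upper ch) "EEG" "") "-" "") "REF" "") = tu := h3.symm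
            have h3b : fmc_clean ch = tu := by rw [← fmc_clean_eq]; exact h3a
            simp [fmcAlt_go, fmc_pass1, fmc_pass2, fmc_pass3, h1, hP, hQ, h3a, h3b, fmcAlt_go_three]
          · have h3' : ¬ tu = fmc_clean ch := by rw [← fmc_clean_eq]; exact h3
            simp [fmcAlt_go, fmc_pass1, fmc_pass2, fmc_pass3, h1, hP, hQ, h3, h3', ih]

-- ===== VERDICT (by name: the statement is the Claim_ definition above) =====
theorem find_matching_channel_spec : Claim_equal_find_matching_channel := by
  intro t l _
  unfold Spec_find_matching_channel find_matching_channel find_matching_channel_alt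
  rw [fmcAlt_go_none]
  cases h1 : fmc_pass1 (PySem.Str.upper t) l <;>
    cases h2 : fmc_pass2 (PySem.Str.upper t) l <;>
    simp [h1, h2, Option.or]
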